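-- pv_equiv track=rewrite | github.com/camellia2077/items | tools/logs/read_log.py | dedupe_consecutive
-- ===== SOURCE A (Python) =====
-- def dedupe_consecutive(lines: list[str]) -> list[str]:
--     if not lines:
--         return []
--
--     collapsed: list[str] = []
--     previous = None
--     repeat_count = 0
--     for line in lines:
--         if line == previous:
--             repeat_count += 1
--             continue
--
--         if previous is not None:
--             collapsed.append(previous)
--             if repeat_count > 0:
--                 collapsed.append("[previous line repeated {0} more times]".format(repeat_count))
--
--         previous = line
--         repeat_count = 0
--
--     if previous is not None:
--         collapsed.append(previous)
--         if repeat_count > 0: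
--             collapsed.append("[previous line repeated {0} more times]".format(repeat_count))
--
--     return collapsed
-- ===== SOURCE B (Python) =====
-- def dedupe_consecutive(lines: list[str]) -> list[str]:
--     out: list[str] = []
--     i, n = 0, len(lines)
--     while i < n:
--         j = i + 1
--         while j < n and lines[j] == lines[i]:
--             j += 1
--         out.append(lines[i])
--         if j - i > 1:
--             out.append("[previous line repeated {0} more times]".format(j - i - 1))
--         i = j
--     return out
-- ===== Notes on version B (the rewrite author's own statement) =====
-- stated objective: alternative
-- what changed: Replaces the previous/repeat_count sentinel state machine with post-loop flush by a two-pointer run scan: for each run [i,j) it emits the line and the repeat summary directly, with no Optional sentinel and no duplicated flush code.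
import Mathlib
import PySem

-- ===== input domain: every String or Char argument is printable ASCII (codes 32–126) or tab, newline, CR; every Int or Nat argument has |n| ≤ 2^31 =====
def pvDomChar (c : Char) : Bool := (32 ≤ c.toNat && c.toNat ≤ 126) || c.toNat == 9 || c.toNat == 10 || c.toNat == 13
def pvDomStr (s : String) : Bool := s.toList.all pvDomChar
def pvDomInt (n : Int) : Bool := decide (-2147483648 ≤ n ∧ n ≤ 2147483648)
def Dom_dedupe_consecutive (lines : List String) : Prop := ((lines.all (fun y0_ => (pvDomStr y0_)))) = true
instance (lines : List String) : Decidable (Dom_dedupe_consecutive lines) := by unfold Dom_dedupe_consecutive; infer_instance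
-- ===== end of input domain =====

-- B replaces A's previous/repeat_count sentinel state machine (with its duplicated post-loop flush)
-- by a two-pointer run scan that emits each run's line and repeat summary directly; same cost, no sentinel.


-- shared string literal: "[previous line repeated {0} more times]".format(k)
def repeatMsg (k : Nat) : String :=
  "[previous line repeated " ++ PySem.Int.toStr (k : Int) ++ " more times]"

-- ===== PORT A =====
-- the post-loop / pre-update flush: append previous (if any) and the repeat summary
def flushA (prev : Option String) (k : Nat) (acc : List String) : List String :=
  match prev with
  | none => acc
  | some p => (acc ++ [p]) ++ (if k > 0 then [repeatMsg k] else [])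

-- the 'for line in lines' loop with state (previous, repeat_count, collapsed)
def loopA : List String → Option String → Nat → List String → List String
  | [], prev, k, acc => flushA prev k acc
  | l :: rest, prev, k, acc =>
      if some l == prev then loopA rest prev (k + 1) acc
      else loopA rest (some l) 0 (flushA prev k acc)

def dedupe_consecutive (lines : List String) : List String :=
  if lines.isEmpty then [] else loopA lines none 0 []

-- ===== PORT B =====
-- inner while: advance j while lines[j] == head
def runEndB (lines : List String) (head : String) (j : Nat) : Nat :=
  if h : j < lines.length then
    if lines[j] == head then runEndB lines head (j + 1) else j
  else j
termination_by lines.length - j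

theorem runEndB_ge (lines : List String) (head : String) (j : Nat) :
    j ≤ runEndB lines head j := by
  fun_induction runEndB with
  | case1 j h hb ih => omega
  | case2 => simp
  | case3 j h => simp

-- outer while over i
def loopB (lines : List String) (i : Nat) (acc : List String) : List String :=
  if h : i < lines.length then
    let j := runEndB lines lines[i] (i + 1)
    loopB lines j
      ((acc ++ [lines[i]]) ++ (if j - i > 1 then [repeatMsg (j - i - 1)] else []))
  else acc
termination_by lines.length - i
decreasing_by
  have := runEndB_ge lines lines[i] (i + 1)
  omega

def dedupe_consecutive_alt (lines : List String) : List String :=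
  loopB lines 0 []

-- ===== PRECONDITION & SPEC =====
def Spec_dedupe_consecutive (lines : List String) (out : List String) : Prop := out = dedupe_consecutive_alt lines
instance (lines : List String) (out : List String) : Decidable (Spec_dedupe_consecutive lines out) := by unfold Spec_dedupe_consecutive; infer_instance

-- ===== CLAIM (what is proved, stated in full; the proofs are below) =====
def Claim_equal_dedupe_consecutive : Prop := ∀ (lines : List String), Dom_dedupe_consecutive lines → Spec_dedupe_consecutive lines (dedupe_consecutive lines)

-- ===== LEMMAS AND PROOFS =====

-- common run-by-run characterisation of the output
def runs : List String → List String
  | [] => []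
  | l :: rest =>
      l :: ((if (rest.takeWhile (· == l)).length > 0
             then [repeatMsg (rest.takeWhile (· == l)).length] else [])
            ++ runs (rest.dropWhile (· == l)))
termination_by xs => xs.length
decreasing_by
  have := List.length_dropWhile_le (· == l) rest
  simpa using Nat.lt_succ_of_le this

theorem loopA_eq (xs : List String) (p : String) (k : Nat) (acc : List String) :
    loopA xs (some p) k acc =
      (acc ++ [p])
        ++ (if k + (xs.takeWhile (· == p)).length > 0
            then [repeatMsg (k + (xs.takeWhile (· == p)).length)] else [])
        ++ runs (xs.dropWhile (· == p)) := by
  induction xs generalizing p k acc with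
  | nil => simp [loopA, flushA, runs]
  | cons x xs ih =>
      by_cases hx : x == p
      · have hx' : x = p := by simpa using hx
        subst hx'
        simp only [loopA, beq_self_eq_true, if_pos,
          List.takeWhile_cons, List.dropWhile_cons]
        rw [ih]
        simp only [List.length_cons]
        ring_nf
      · have hx2 : (some x == some p) = false := by simpa using hx
        simp only [loopA, hx2, Bool.false_eq_true, if_false, flushA]
        rw [ih, List.takeWhile_cons_of_neg (by simpa using hx),
          List.dropWhile_cons_of_neg (by simpa using hx)]
        simp [runs]

theorem dedupe_consecutive_eq_runs (lines : List String) :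
    dedupe_consecutive lines = runs lines := by
  cases lines with
  | nil => simp [dedupe_consecutive, runs]
  | cons l rest =>
      show loopA (l :: rest) none 0 [] = _
      simp only [loopA, flushA]
      have : (some l == (none : Option String)) = false := rfl
      rw [this]
      simp only [Bool.false_eq_true]
      rw [loopA_eq]
      simp [runs]

theorem drop_length_takeWhile {α : Type} (p : α → Bool) (xs : List α) :
    xs.drop (xs.takeWhile p).length = xs.dropWhile p := by
  induction xs with
  | nil => simp
  | cons x xs ih =>
      by_cases h : p x <;>
        simp [h, ih]

theorem runEndB_eq (lines : List String) (head : String) (j : Nat) :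
    runEndB lines head j = j + ((lines.drop j).takeWhile (· == head)).length := by
  fun_induction runEndB with
  | case1 j h hb ih =>
      rw [List.drop_eq_getElem_cons h,
        List.takeWhile_cons_of_pos (by simpa using hb), ih]
      simp only [List.length_cons]
      omega
  | case2 j h hb =>
      rw [List.drop_eq_getElem_cons h,
        List.takeWhile_cons_of_neg (by simpa using hb)]
      simp
  | case3 j h =>
      have : lines.drop j = [] := List.drop_eq_nil_of_le (by omega)
      simp [this]

theorem loopB_eq (lines : List String) (i : Nat) (acc : List String) :
    loopB lines i acc = acc ++ runs (lines.drop i) := by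
  fun_induction loopB with
  | case1 i acc h j ih =>
      simp only [dite_eq_ite] at ih
      rw [ih]
      have hdrop : lines.drop i = lines[i] :: lines.drop (i + 1) :=
        List.drop_eq_getElem_cons h
      have hje : j = (i + 1) + ((lines.drop (i + 1)).takeWhile (· == lines[i])).length :=
        runEndB_eq lines lines[i] (i + 1)
      set t := ((lines.drop (i + 1)).takeWhile (· == lines[i])).length with ht
      have hdj : lines.drop j = (lines.drop (i + 1)).dropWhile (· == lines[i]) := by
        have h1 : lines.drop j = (lines.drop (i + 1)).drop t := by
          rw [List.drop_drop, show i + 1 + t = j by omega]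
        rw [h1, ht]
        exact drop_length_takeWhile _ _
      rw [hdj, hdrop]
      have h1 : j - i > 1 ↔ t > 0 := by omega
      have h2 : j - i - 1 = t := by omega
      simp only [runs, h2]
      by_cases hc : t > 0
      · rw [if_pos hc, if_pos (h1.mpr hc)]
        simp [ht]
      · rw [if_neg hc, if_neg (fun hh => hc (h1.mp hh))]
        simp
  | case2 i acc h =>
      have : lines.drop i = [] := List.drop_eq_nil_of_le (by omega)
      simp [this, runs]

-- ===== VERDICT (by name: the statement is the Claim_ definition above) =====
theorem dedupe_consecutive_spec : Claim_equal_dedupe_consecutive := by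
  intro lines _
  show dedupe_consecutive lines = dedupe_consecutive_alt lines
  rw [dedupe_consecutive_eq_runs]
  unfold dedupe_consecutive_alt
  rw [loopB_eq]
  simp
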